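-- pv_equiv track=rewrite | github.com/oszypczy/hackaton | code/attacks/run_attack_B2.py | perturb
-- ===== SOURCE A (Python) =====
-- ZWSP        = "​"
--
-- INSERT_EVERY = 1   # every word — every content token gets ZWSP as prev → green-list reseeded
--
-- def perturb(text: str, every: int = INSERT_EVERY) -> str:
--     parts = text.split(" ")
--     out: list[str] = []
--     for i, w in enumerate(parts):
--         out.append(w)
--         if (i + 1) % every == 0 and i < len(parts) - 1:
--             out.append(ZWSP)
--     return " ".join(out)
-- ===== SOURCE B (Python) =====
-- ZWSP = "\u200b"
--
-- def perturb(text: str, every: int = 1) -> str: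
--     words = text.split(" ")
--     groups = []
--     while words:
--         groups.append(" ".join(words[:every]))
--         words = words[every:]
--     return (" " + ZWSP + " ").join(groups)
-- ===== Notes on version B (the rewrite author's own statement) =====
-- stated objective: alternative
-- what changed: B groups the word list into consecutive chunks of `every` words with a while-loop over list slices and joins the chunks with ' ZWSP ', instead of A's indexed loop testing (i+1) % every per word; Pre_ excludes every <= 0, where A raises ZeroDivisionError (every = 0) or, for negative every, returns a value only via Python's accidental sign-of-divisor modulo while B's slicing loop does not terminate.
-- outside the precondition, e.g. on perturb('a b', -1): A returns 'a \u200b b', B does not finish within the time limit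
import Mathlib
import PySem

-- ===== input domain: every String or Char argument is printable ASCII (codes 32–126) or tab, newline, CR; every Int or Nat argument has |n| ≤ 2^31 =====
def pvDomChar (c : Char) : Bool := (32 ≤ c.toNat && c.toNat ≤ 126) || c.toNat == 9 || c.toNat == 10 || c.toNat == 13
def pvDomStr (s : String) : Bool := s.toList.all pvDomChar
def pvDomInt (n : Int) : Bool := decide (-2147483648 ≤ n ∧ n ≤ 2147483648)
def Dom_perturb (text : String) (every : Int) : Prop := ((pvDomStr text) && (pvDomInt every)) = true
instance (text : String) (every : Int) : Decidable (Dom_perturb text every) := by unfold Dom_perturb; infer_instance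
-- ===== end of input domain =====

-- B replaces A's indexed loop with a modulo test by a while-loop that slices the word list into
-- consecutive groups of `every` words and joins the groups with " ZWSP " (objective: alternative
-- decomposition, same cost).

def pvZWSP : String := "\u200B"

-- ===== PORT A =====
def perturb (text : String) (every : Int) : String :=
  let parts := (PySem.Str.split? text " ").getD []   -- text.split(" "); sep ≠ "" so split? is some
  let out : List String :=
    (PySem.List.enumerate parts 0).foldl
      (fun out iw =>
        let out := out ++ [iw.2]
        if PySem.Int.mod (iw.1 + 1) every = 0 ∧ iw.1 < (parts.length : Int) - 1
        then out ++ [pvZWSP] else out)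
      []
  PySem.Str.join " " out

-- ===== PORT B =====
-- the while-loop of Source B: while words: groups.append(" ".join(words[:every])); words = words[every:]
-- The 'every ≤ 0' branch is a totality guard only: the Python loop does not terminate there
-- (words[0:] / words[-k:] never empties the list); unreachable under Pre_, where 1 ≤ every.
def pvGroups (words : List String) (every : Int) : List String :=
  if words = [] ∨ every ≤ 0 then []
  else PySem.Str.join " " (PySem.List.slice words none (some every))
       :: pvGroups (PySem.List.slice words (some every) none) every
termination_by words.length
decreasing_by
  rename_i h
  push_neg at h
  rw [PySem.List.slice_from words (by omega)]
  simp only [List.length_drop]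
  have : words.length ≠ 0 := fun hn => h.1 (List.eq_nil_of_length_eq_zero hn)
  omega

def perturb_alt (text : String) (every : Int) : String :=
  let words := (PySem.Str.split? text " ").getD []
  PySem.Str.join (" " ++ pvZWSP ++ " ") (pvGroups words every)

-- ===== PRECONDITION & SPEC =====
-- Pre_ excludes every ≤ 0: at every = 0 A raises ZeroDivisionError; for negative every A's value
-- rests on Python's sign-of-divisor modulo (an accidental corner) and B's slicing loop diverges.
def Pre_perturb (text : String) (every : Int) : Prop := 1 ≤ every
instance (text : String) (every : Int) : Decidable (Pre_perturb text every) := by unfold Pre_perturb; infer_instance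
def pvWitness_perturb : String × Int := ("hello zwsp world", 2)
def Spec_perturb (text : String) (every : Int) (out : String) : Prop := out = perturb_alt text every
instance (text : String) (every : Int) (out : String) : Decidable (Spec_perturb text every out) := by unfold Spec_perturb; infer_instance

-- ===== CLAIM (what is proved, stated in full; the proofs are below) =====
def Claim_equal_perturb : Prop := ∀ (text : String) (every : Int), Dom_perturb text every → Pre_perturb text every → Spec_perturb text every (perturb text every)

-- ===== LEMMAS AND PROOFS =====

-- the per-word token list A's loop body appends (word, plus ZWSP when the test fires)
def pvTok (n every : Int) (p : Int × String) : List String :=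
  p.2 :: (if PySem.Int.mod (p.1 + 1) every = 0 ∧ p.1 < n - 1 then [pvZWSP] else [])

lemma pvFold_eq_flatMap (parts : List String) (every n : Int) :
    (PySem.List.enumerate parts 0).foldl
      (fun out iw =>
        let out := out ++ [iw.2]
        if PySem.Int.mod (iw.1 + 1) every = 0 ∧ iw.1 < n - 1
        then out ++ [pvZWSP] else out)
      []
    = List.flatMap (pvTok n every) (PySem.List.enumerate parts 0) := by
  rw [PySem.List.foldl_congr_mem _ _ (fun out iw => out ++ pvTok n every iw) _
    (by
      intro acc x _
      by_cases h : PySem.Int.mod (x.1 + 1) every = 0 ∧ x.1 < n - 1 <;>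
        simp [pvTok, h])]
  simpa using PySem.List.foldl_append_eq_flatMap (pvTok n every) (PySem.List.enumerate parts 0) []

lemma pvJoin_nil (sep : String) : PySem.Str.join sep [] = "" := by
  rw [← String.toList_inj]; simp [PySem.Str.toList_join, PySem.Chars.join_nil]

lemma pvJoin_singleton (sep x : String) : PySem.Str.join sep [x] = x := by
  rw [← String.toList_inj]; simp [PySem.Str.toList_join, PySem.Chars.join_singleton]

lemma pvJoin_cons_cons (sep x y : String) (rest : List String) :
    PySem.Str.join sep (x :: y :: rest) = x ++ sep ++ PySem.Str.join sep (y :: rest) := by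
  rw [← String.toList_inj]; simp [PySem.Str.toList_join, PySem.Chars.join_cons_cons]

lemma pvJoin_append (sep : String) (xs ys : List String) (hx : xs ≠ []) (hy : ys ≠ []) :
    PySem.Str.join sep (xs ++ ys) = PySem.Str.join sep xs ++ sep ++ PySem.Str.join sep ys := by
  induction xs with
  | nil => exact absurd rfl hx
  | cons a t ih =>
    cases t with
    | nil =>
      obtain ⟨b, ys', rfl⟩ := List.exists_cons_of_ne_nil hy
      simp [pvJoin_cons_cons, pvJoin_singleton]
    | cons b t' =>
      have h2 : (b :: t') ++ ys = b :: (t' ++ ys) := rfl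
      calc PySem.Str.join sep ((a :: b :: t') ++ ys)
          = a ++ sep ++ PySem.Str.join sep ((b :: t') ++ ys) := by
            rw [List.cons_append, h2, pvJoin_cons_cons, ← h2]
        _ = a ++ sep ++ (PySem.Str.join sep (b :: t') ++ sep ++ PySem.Str.join sep ys) := by
            rw [ih (by simp)]
        _ = PySem.Str.join sep (a :: b :: t') ++ sep ++ PySem.Str.join sep ys := by
            rw [pvJoin_cons_cons]; simp [String.append_assoc]

lemma pvRun_none (n every : Int) (ws : List String) : ∀ (s : Int),
    (∀ k : Nat, k < ws.length → ¬ (PySem.Int.mod (s + k + 1) every = 0 ∧ s + k < n - 1)) →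
    List.flatMap (pvTok n every) (PySem.List.enumerate ws s) = ws := by
  induction ws with
  | nil => intro s _; simp [PySem.List.enumerate_nil]
  | cons w t ih =>
    intro s h
    rw [PySem.List.enumerate_cons]
    have h0 := h 0 (by simp)
    simp only [Nat.cast_zero, add_zero] at h0
    simp only [List.flatMap_cons, pvTok, if_neg h0]
    rw [ih (s + 1) (by
      intro k hk
      have := h (k + 1) (by simpa using Nat.succ_lt_succ hk)
      push_cast at this ⊢
      convert this using 3 <;> ring_nf)]
    simp

lemma pvRun_last (n every : Int) (ws : List String) : ∀ (s : Int),
    ws ≠ [] →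
    (∀ k : Nat, k + 1 < ws.length → ¬ (PySem.Int.mod (s + k + 1) every = 0 ∧ s + k < n - 1)) →
    (PySem.Int.mod (s + ws.length) every = 0 ∧ s + ws.length - 1 < n - 1) →
    List.flatMap (pvTok n every) (PySem.List.enumerate ws s) = ws ++ [pvZWSP] := by
  induction ws with
  | nil => intro s h; exact absurd rfl h
  | cons w t ih =>
    intro s _ h1 h2
    rw [PySem.List.enumerate_cons]
    cases t with
    | nil =>
      simp only [List.length_cons, List.length_nil, Nat.cast_add, Nat.cast_zero, Nat.cast_one] at h2
      have hc : PySem.Int.mod (s + 1) every = 0 ∧ s < n - 1 := by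
        constructor
        · convert h2.1 using 2 <;> ring
        · omega
      simp [PySem.List.enumerate_nil, pvTok, hc]
    | cons b t' =>
      have h0 := h1 0 (by simp)
      simp only [Nat.cast_zero, add_zero] at h0
      simp only [List.flatMap_cons, pvTok, if_neg h0]
      rw [ih (s + 1) (by simp)
        (by
          intro k hk
          have := h1 (k + 1) (by simpa using Nat.succ_lt_succ hk)
          push_cast at this ⊢
          convert this using 3 <;> ring_nf)
        (by
          simp only [List.length_cons] at h2 ⊢
          push_cast at h2 ⊢
          constructor
          · convert h2.1 using 2 <;> ring
          · omega)]
      simp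

lemma pvFlatMap_tok_ne_nil (n every : Int) (l : List (Int × String)) (h : l ≠ []) :
    List.flatMap (pvTok n every) l ≠ [] := by
  obtain ⟨p, t, rfl⟩ := List.exists_cons_of_ne_nil h
  simp [pvTok]

lemma pvDvd_bound (e : Int) (he : 1 ≤ e) (k : Nat) (hk : (k : Int) + 1 < e)
    (hd : e ∣ (k : Int) + 1) : False := by
  have := Int.le_of_dvd (by positivity) hd
  omega

lemma pvGroups_ne_nil (words : List String) (every : Int) (hw : words ≠ []) (he : 1 ≤ every) :
    pvGroups words every ≠ [] := by
  rw [pvGroups, if_neg (by push_neg; exact ⟨hw, by omega⟩)]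
  simp

lemma pvMain (every : Int) (hev : 1 ≤ every) : ∀ (m : Nat) (parts : List String) (c : Nat) (n : Int),
    parts.length ≤ m →
    n = (c : Int) * every + parts.length →
    PySem.Str.join " " (List.flatMap (pvTok n every)
        (PySem.List.enumerate parts ((c : Int) * every)))
    = PySem.Str.join (" " ++ pvZWSP ++ " ") (pvGroups parts every) := by
  intro m
  induction m with
  | zero =>
    intro parts c n hm _
    have hnil : parts = [] := List.eq_nil_of_length_eq_zero (Nat.le_zero.mp hm)
    subst hnil
    rw [pvGroups, if_pos (Or.inl rfl), PySem.List.enumerate_nil]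
    simp only [List.flatMap_nil, pvJoin_nil]
  | succ m ih =>
    intro parts c n hm hn
    by_cases hnil : parts = []
    · subst hnil
      rw [pvGroups, if_pos (Or.inl rfl), PySem.List.enumerate_nil]
      simp only [List.flatMap_nil, pvJoin_nil]
    by_cases hle : (parts.length : Int) ≤ every
    · -- final (short) group: no ZWSP anywhere
      rw [pvGroups, if_neg (by push_neg; exact ⟨hnil, by omega⟩),
        PySem.List.slice_to parts (by omega), PySem.List.slice_from parts (by omega)]
      have htake : List.take every.toNat parts = parts :=
        List.take_of_length_le (by omega)
      have hdrop : List.drop every.toNat parts = [] :=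
        List.drop_eq_nil_of_le (by omega)
      rw [htake, hdrop, pvGroups, if_pos (Or.inl rfl)]
      rw [pvRun_none n every parts _ (by
        intro k hk hC
        obtain ⟨hm0, hlt⟩ := hC
        rw [PySem.Int.mod_eq_zero_iff_dvd] at hm0
        have hd : every ∣ (k : Int) + 1 := by
          have hce : every ∣ (c : Int) * every := ⟨c, by ring⟩
          have := hm0.sub hce
          simpa [add_sub_cancel_left, add_assoc] using this
        exact pvDvd_bound every hev k (by omega) hd)]
      rw [pvJoin_singleton]
    · -- a full group of every words, then recurse
      push_neg at hle
      rw [pvGroups, if_neg (by push_neg; exact ⟨hnil, by omega⟩),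
        PySem.List.slice_to parts (by omega), PySem.List.slice_from parts (by omega)]
      have hlen_take : (List.take every.toNat parts).length = every.toNat := by
        simp; omega
      -- split the word list at every
      conv_lhs => rw [← List.take_append_drop every.toNat parts]
      rw [PySem.List.enumerate_append, List.flatMap_append]
      have hfirst : List.flatMap (pvTok n every)
          (PySem.List.enumerate (List.take every.toNat parts) ((c : Int) * every))
          = List.take every.toNat parts ++ [pvZWSP] := by
        apply pvRun_last n every _ _ (by
          intro h0
          rw [h0] at hlen_take
          simp at hlen_take
          omega)
        · intro k hk hC
          obtain ⟨hm0, _⟩ := hC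
          rw [hlen_take] at hk
          rw [PySem.Int.mod_eq_zero_iff_dvd] at hm0
          have hd : every ∣ (k : Int) + 1 := by
            have hce : every ∣ (c : Int) * every := ⟨c, by ring⟩
            have := hm0.sub hce
            simpa [add_sub_cancel_left, add_assoc] using this
          exact pvDvd_bound every hev k (by omega) hd
        · rw [hlen_take]
          have hcast : ((every.toNat : Nat) : Int) = every := by omega
          constructor
          · rw [PySem.Int.mod_eq_zero_iff_dvd, hcast]
            exact ⟨(c : Int) + 1, by ring⟩
          · rw [hcast]; omega
      rw [hfirst]
      have hrest := ih (List.drop every.toNat parts) (c + 1) n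
        (by simp; omega)
        (by
          rw [List.length_drop, Nat.cast_sub (by omega : every.toNat ≤ parts.length),
            (by omega : ((every.toNat : Nat) : Int) = every)]
          push_cast
          push_cast at hn
          linear_combination hn)
      have hstart : ((c : Int) * every + ((List.take every.toNat parts).length : Int))
          = ((c + 1 : Nat) : Int) * every := by
        rw [hlen_take]; push_cast; have : ((every.toNat : Nat) : Int) = every := by omega
        rw [this]; ring
      rw [hstart]
      -- nonemptiness facts
      have hdrop_ne : List.drop every.toNat parts ≠ [] := by
        apply List.ne_nil_of_length_pos
        simp; omega
      have hrest_ne : List.flatMap (pvTok n every)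
          (PySem.List.enumerate (List.drop every.toNat parts) (((c + 1 : Nat) : Int) * every)) ≠ [] := by
        apply pvFlatMap_tok_ne_nil
        intro h0
        have := PySem.List.length_enumerate (List.drop every.toNat parts) (((c + 1 : Nat) : Int) * every)
        rw [h0] at this
        simp at this
        omega
      have htake_ne : List.take every.toNat parts ≠ [] := by
        intro h0
        rw [h0] at hlen_take
        simp at hlen_take
        omega
      obtain ⟨r, rest', hr⟩ := List.exists_cons_of_ne_nil hrest_ne
      obtain ⟨g1, gr, hg1⟩ := List.exists_cons_of_ne_nil
        (pvGroups_ne_nil (List.drop every.toNat parts) every hdrop_ne hev)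
      rw [List.append_assoc, pvJoin_append " " _ _ htake_ne (by simp), hr,
        List.singleton_append, pvJoin_cons_cons, ← hr, hrest, hg1, pvJoin_cons_cons]
      simp [String.append_assoc]

-- ===== VERDICT (by name: the statement is the Claim_ definition above) =====
theorem perturb_spec : Claim_equal_perturb := by
  intro text every _ hpre
  unfold Spec_perturb perturb perturb_alt
  simp only []
  rw [pvFold_eq_flatMap]
  have := pvMain every hpre ((PySem.Str.split? text " ").getD []).length
    ((PySem.Str.split? text " ").getD []) 0 (((PySem.Str.split? text " ").getD []).length : Int)
    le_rfl (by simp)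
  simpa using this
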